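-- pv_equiv track=rewrite | github.com/mccredie/nonogram | nonogram.py | iter_lane_truth
-- ===== SOURCE A (Python) =====
-- def iter_lane_truth(possibilities):
--     possibilities = list(possibilities)
--     length = len(possibilities[0])
--     for i in range(length):
--         if all(possibility[i] == '#' for possibility in possibilities):
--             yield '#'
--         elif not any(possibility[i] == '#' for possibility in possibilities):
--             yield '.'
--         else:
--             yield '?'
-- ===== SOURCE B (Python) =====
-- def iter_lane_truth(possibilities):
--     possibilities = list(possibilities)
--     length = len(possibilities[0])
--     n = len(possibilities)
--     counts = [0] * length
--     for possibility in possibilities: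
--         counts = [c + (ch == '#') for c, ch in zip(counts, possibility)]
--     for c in counts:
--         yield '#' if c == n else ('.' if c == 0 else '?')
-- ===== Notes on version B (the rewrite author's own statement) =====
-- stated objective: alternative
-- what changed: Replaces A's two short-circuiting per-column boolean scans (all/any) with a single row-major accumulation pass building a per-column '#' count table, followed by one classification pass over the counts.
-- outside the precondition, e.g. on iter_lane_truth(['.', '#', '']): A returns ['?'], B returns []
import Mathlib
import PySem

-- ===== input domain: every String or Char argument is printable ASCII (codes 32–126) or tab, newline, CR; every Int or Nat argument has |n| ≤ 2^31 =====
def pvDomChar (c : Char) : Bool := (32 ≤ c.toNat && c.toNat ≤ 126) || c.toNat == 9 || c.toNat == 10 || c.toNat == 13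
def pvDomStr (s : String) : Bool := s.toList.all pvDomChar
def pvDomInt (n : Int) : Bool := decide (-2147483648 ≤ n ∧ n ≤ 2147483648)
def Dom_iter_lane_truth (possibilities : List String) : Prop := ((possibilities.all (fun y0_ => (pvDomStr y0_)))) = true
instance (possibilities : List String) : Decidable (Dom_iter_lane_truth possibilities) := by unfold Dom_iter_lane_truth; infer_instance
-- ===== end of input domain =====

-- B replaces A's two short-circuiting per-column all/any scans with one row-major
-- accumulation pass building a per-column '#' count table plus a classifying pass;
-- same cost, different decomposition (objective: alternative).

-- ===== PORT A =====
-- per-column character access; under Pre_ every index i < length is in range for every row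
def iter_lane_truth (possibilities : List String) : List String :=
  let length := (possibilities.headD "").toList.length
  (List.range length).map (fun i =>
    if possibilities.all (fun p => p.toList.getD i ' ' == '#') then "#"
    else if !(possibilities.any (fun p => p.toList.getD i ' ' == '#')) then "."
    else "?")

-- ===== PORT B =====
-- one row of the accumulation pass: counts = [c + (ch == '#') for c, ch in zip(counts, p)]
def pvStep (counts : List Int) (p : String) : List Int :=
  List.zipWith (fun c ch => c + (if ch == '#' then (1 : Int) else 0)) counts p.toList

def iter_lane_truth_alt (possibilities : List String) : List String :=
  let length := (possibilities.headD "").toList.length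
  let n := possibilities.length
  let counts := possibilities.foldl pvStep (List.replicate length (0 : Int))
  counts.map (fun c => if c == (n : Int) then "#" else if c == (0 : Int) then "." else "?")

-- ===== PRECONDITION & SPEC =====
-- Pre_ excludes the empty list (A raises IndexError on possibilities[0]) and ragged inputs
-- in which some row is shorter than the first (there A usually raises IndexError, and where
-- its short-circuiting all/any happens to skip the short row its value is an accident of
-- evaluation order that B's full count pass cannot see).
def Pre_iter_lane_truth (possibilities : List String) : Prop :=
  possibilities ≠ [] ∧
  ∀ p ∈ possibilities, (possibilities.headD "").toList.length ≤ p.toList.length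
instance (possibilities : List String) : Decidable (Pre_iter_lane_truth possibilities) := by
  unfold Pre_iter_lane_truth; infer_instance

def pvWitness_iter_lane_truth : List String := ["#.?", "##?"]

def Spec_iter_lane_truth (possibilities : List String) (out : List String) : Prop :=
  out = iter_lane_truth_alt possibilities
instance (possibilities : List String) (out : List String) : Decidable (Spec_iter_lane_truth possibilities out) := by
  unfold Spec_iter_lane_truth; infer_instance

-- ===== CLAIM (what is proved, stated in full; the proofs are below) =====
def Claim_equal_iter_lane_truth : Prop := ∀ (possibilities : List String), Dom_iter_lane_truth possibilities → Pre_iter_lane_truth possibilities → Spec_iter_lane_truth possibilities (iter_lane_truth possibilities)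

-- ===== LEMMAS AND PROOFS =====

-- a list equals the table of its entries
theorem pv_list_eq_map_range {α : Type} [Inhabited α] (l : List α) (d : α) (L : Nat)
    (h : l.length = L) : l = (List.range L).map (fun i => l.getD i d) := by
  subst h
  apply List.ext_getElem
  · simp
  · intro i h1 h2
    simp [List.getD_eq_getElem?_getD, (by simpa using h2 : i < l.length)]

-- the accumulation pass computes, per column, the starting value plus the '#' count
theorem pv_foldl_step (ps : List String) : ∀ (counts : List Int) (L : Nat),
    counts.length = L → (∀ p ∈ ps, L ≤ p.toList.length) →
    ps.foldl pvStep counts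
      = (List.range L).map
          (fun i => counts.getD i 0 + (ps.countP (fun p => p.toList.getD i ' ' == '#') : Int)) := by
  induction ps with
  | nil =>
      intro counts L hlen _
      simpa using pv_list_eq_map_range counts 0 L hlen
  | cons p ps ih =>
      intro counts L hlen hge
      have hpL : L ≤ p.toList.length := hge p (by simp)
      have hstep_len : (pvStep counts p).length = L := by
        unfold pvStep
        rw [List.length_zipWith]
        omega
      have := ih (pvStep counts p) L hstep_len (fun q hq => hge q (by simp [hq]))
      rw [List.foldl_cons, this]
      apply List.map_congr_left
      intro i hi
      have hiL : i < L := List.mem_range.mp hi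
      have hic : i < counts.length := by omega
      have hip : i < p.toList.length := by omega
      have hstep : (pvStep counts p).getD i 0
          = counts.getD i 0 + (if p.toList.getD i ' ' == '#' then (1 : Int) else 0) := by
        have hiz : i < (pvStep counts p).length := by omega
        rw [List.getD_eq_getElem _ _ hiz, List.getD_eq_getElem _ _ hic,
            List.getD_eq_getElem _ _ hip]
        simp [pvStep]
      rw [hstep, List.countP_cons]
      push_cast
      ring

-- column classification: all/any agree with count-against-n/zero tests
theorem pv_classify (ps : List String) (i : Nat) :
    (if ps.all (fun p => p.toList.getD i ' ' == '#') then "#"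
     else if !(ps.any (fun p => p.toList.getD i ' ' == '#')) then "." else "?")
    = (if ((ps.countP (fun p => p.toList.getD i ' ' == '#') : Int)) == (ps.length : Int) then "#"
       else if ((ps.countP (fun p => p.toList.getD i ' ' == '#') : Int)) == (0 : Int) then "."
       else "?") := by
  set P : String → Bool := fun p => p.toList.getD i ' ' == '#' with hP
  by_cases hall : ps.all P
  · have hc : ps.countP P = ps.length := List.countP_eq_length.mpr (by simpa [List.all_eq_true] using hall)
    simp [hall, hc]
  · have hne : ps.countP P ≠ ps.length := fun h => hall (by simp only [List.all_eq_true]; exact List.countP_eq_length.mp h)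
    have hlt : ps.countP P < ps.length := lt_of_le_of_ne (List.countP_le_length (l := ps)) hne
    have h1 : ((ps.countP P : Int) == (ps.length : Int)) = false := by
      simp only [beq_eq_false_iff_ne]; omega
    by_cases hany : ps.any P
    · have hpos : 0 < ps.countP P := by
        rcases List.any_eq_true.mp hany with ⟨a, ha, hpa⟩
        exact List.countP_pos_iff.mpr ⟨a, ha, hpa⟩
      have h2 : ((ps.countP P : Int) == (0 : Int)) = false := by
        simp only [beq_eq_false_iff_ne]; omega
      simp [hall, hany, h1, h2]
    · have hz : ps.countP P = 0 := by
        refine List.countP_eq_zero.mpr ?_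
        intro a ha
        exact fun hpa => hany (List.any_eq_true.mpr ⟨a, ha, hpa⟩)
      have hlen0 : 0 < ps.length := by
        cases ps with
        | nil => exact absurd rfl hall
        | cons q qs => simp
      simp [hall, hany, hz]
      omega

-- ===== VERDICT (by name: the statement is the Claim_ definition above) =====
theorem iter_lane_truth_spec : Claim_equal_iter_lane_truth := by
  intro ps _ hpre
  obtain ⟨-, hge⟩ := hpre
  unfold Spec_iter_lane_truth iter_lane_truth iter_lane_truth_alt
  dsimp only
  set L := (ps.headD "").toList.length with hL
  rw [pv_foldl_step ps (List.replicate L (0 : Int)) L (by simp) hge]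
  rw [List.map_map]
  apply List.map_congr_left
  intro i hi
  have hiL : i < L := List.mem_range.mp hi
  simp only [Function.comp]
  have hrep : (List.replicate L (0 : Int)).getD i 0 = 0 := by
    rw [List.getD_eq_getElem _ _ (by simpa using hiL)]
    simp
  simp only [hrep, zero_add]
  exact pv_classify ps i
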